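-- pv_equiv track=rewrite | github.com/Park-EunBi/algorithm | programmers/2022/level1_모의고사.py | solution
-- ===== SOURCE A (Python) =====
-- def solution(answers):
--     one = [1, 2, 3, 4, 5]
--     two = [2, 1, 2, 3, 2, 4, 2, 5]
--     three = [3, 3, 1, 1, 2, 2, 4, 4, 5, 5]
--     score = [0, 0, 0]
--     for i in range(len(answers)):
--         if (answers[i] == one[i%len(one)]):
--             score[0] += 1
--         if (answers[i] == two[i % len(two)]):
--             score[1] += 1
--         if (answers[i] == three[i % len(three)]):
--             score[2] += 1
--     m = max(score)
--     answer = [i + 1 for i, v in enumerate(score) if v == m]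
--
--     return answer
-- ===== SOURCE B (Python) =====
-- def solution(answers):
--     patterns = [[1, 2, 3, 4, 5],
--                 [2, 1, 2, 3, 2, 4, 2, 5],
--                 [3, 3, 1, 1, 2, 2, 4, 4, 5, 5]]
--     # All three patterns repeat with period dividing 40 (= lcm(5, 8, 10)), so the
--     # score depends only on the frequency of each (i % 40, value) pair: build that
--     # frequency table in one pass, then each score is just 40 table lookups.
--     cnt = {}
--     for i, a in enumerate(answers):
--         k = (i % 40, a)
--         cnt[k] = cnt.get(k, 0) + 1
--     score = [sum(cnt.get((j, p[j % len(p)]), 0) for j in range(40))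
--              for p in patterns]
--     m = max(score)
--     return [i + 1 for i, v in enumerate(score) if v == m]
-- ===== Notes on version B (the rewrite author's own statement) =====
-- stated objective: alternative
-- what changed: Replaces A's per-index loop with three pattern branches and mutable score cells by a frequency table keyed by (i mod 40, value) built in one pass (all patterns repeat with period dividing 40), from which each score is computed as 40 dictionary lookups; the max/tie tail is unchanged.
import Mathlib
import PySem

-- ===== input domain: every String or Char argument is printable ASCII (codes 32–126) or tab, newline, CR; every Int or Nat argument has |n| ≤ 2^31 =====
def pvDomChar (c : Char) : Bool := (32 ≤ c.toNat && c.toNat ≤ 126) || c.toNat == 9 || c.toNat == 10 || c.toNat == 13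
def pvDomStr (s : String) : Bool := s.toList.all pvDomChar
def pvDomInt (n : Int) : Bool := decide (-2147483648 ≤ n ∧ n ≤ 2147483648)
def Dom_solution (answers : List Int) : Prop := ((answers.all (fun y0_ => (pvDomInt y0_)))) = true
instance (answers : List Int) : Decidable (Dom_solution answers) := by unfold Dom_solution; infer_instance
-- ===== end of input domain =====

-- B replaces A's per-index loop with three branches and mutable score cells by a
-- frequency table keyed by (i mod 40, value) built in one pass (all patterns have
-- period dividing 40), from which each score is 40 dictionary lookups (alternative).

-- ===== PORT A =====
-- A's loop body: the three successive ifs updating score[0..2]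
def pvStepA (s : Int × Int × Int) (i a : Int) : Int × Int × Int :=
  let one : List Int := [1, 2, 3, 4, 5]
  let two : List Int := [2, 1, 2, 3, 2, 4, 2, 5]
  let three : List Int := [3, 3, 1, 1, 2, 2, 4, 4, 5, 5]
  let s := if a = PySem.List.pyGetD one (PySem.Int.mod i (one.length : Int)) 0 then (s.1 + 1, s.2.1, s.2.2) else s
  let s := if a = PySem.List.pyGetD two (PySem.Int.mod i (two.length : Int)) 0 then (s.1, s.2.1 + 1, s.2.2) else s
  if a = PySem.List.pyGetD three (PySem.Int.mod i (three.length : Int)) 0 then (s.1, s.2.1, s.2.2 + 1) else s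

def solution (answers : List Int) : List Int :=
  let score :=
    (PySem.List.pyRange 0 (answers.length : Int) 1).foldl
      (fun s i => pvStepA s i (PySem.List.pyGetD answers i 0)) (0, 0, 0)
  let scoreL : List Int := [score.1, score.2.1, score.2.2]
  let m := (PySem.List.max? scoreL (fun x => x)).getD 0
  ((PySem.List.enumerate scoreL 0).filter (fun p => p.2 == m)).map (fun p => p.1 + 1)

-- ===== PORT B =====
-- cnt[k] = cnt.get(k, 0) + 1 over k = (i % 40, a)
def pvCnt (answers : List Int) : PySem.Dict (Int × Int) Int :=
  (PySem.List.enumerate answers 0).foldl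
    (fun d p => d.insert (PySem.Int.mod p.1 40, p.2) (d.getD (PySem.Int.mod p.1 40, p.2) 0 + 1))
    PySem.Dict.empty

def solution_alt (answers : List Int) : List Int :=
  let patterns : List (List Int) :=
    [[1, 2, 3, 4, 5], [2, 1, 2, 3, 2, 4, 2, 5], [3, 3, 1, 1, 2, 2, 4, 4, 5, 5]]
  let cnt := pvCnt answers
  let score := patterns.map (fun p =>
    ((PySem.List.pyRange 0 40 1).map
      (fun j => cnt.getD (j, PySem.List.pyGetD p (PySem.Int.mod j (p.length : Int)) 0) 0)).sum)
  let m := (PySem.List.max? score (fun x => x)).getD 0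
  ((PySem.List.enumerate score 0).filter (fun p => p.2 == m)).map (fun p => p.1 + 1)

-- ===== PRECONDITION & SPEC =====
def Spec_solution (answers : List Int) (out : List Int) : Prop := out = solution_alt answers
instance (answers : List Int) (out : List Int) : Decidable (Spec_solution answers out) := by unfold Spec_solution; infer_instance

-- ===== CLAIM (what is proved, stated in full; the proofs are below) =====
def Claim_equal_solution : Prop := ∀ (answers : List Int), Dom_solution answers → Spec_solution answers (solution answers)

-- ===== LEMMAS AND PROOFS =====

-- number of indexed elements matching a pattern cyclically (characterises both sides)
def pvMatch (pat : List Int) (l : List (Int × Int)) : Int :=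
  ((l.filter (fun p => p.2 = PySem.List.pyGetD pat (PySem.Int.mod p.1 (pat.length : Int)) 0)).length : Int)

theorem pvFoldA_eq (l : List (Int × Int)) : ∀ (s0 s1 s2 : Int),
    l.foldl (fun s p => pvStepA s p.1 p.2) (s0, s1, s2) =
      (s0 + pvMatch [1, 2, 3, 4, 5] l,
       s1 + pvMatch [2, 1, 2, 3, 2, 4, 2, 5] l,
       s2 + pvMatch [3, 3, 1, 1, 2, 2, 4, 4, 5, 5] l) := by
  induction l with
  | nil => intro s0 s1 s2; simp [pvMatch]
  | cons p l ih =>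
    intro s0 s1 s2
    simp only [List.foldl_cons]
    have hu : pvStepA (s0, s1, s2) p.1 p.2 =
        (s0 + (if p.2 = PySem.List.pyGetD [1, 2, 3, 4, 5] (PySem.Int.mod p.1 (([1, 2, 3, 4, 5] : List Int).length : Int)) 0 then (1 : Int) else 0),
         s1 + (if p.2 = PySem.List.pyGetD [2, 1, 2, 3, 2, 4, 2, 5] (PySem.Int.mod p.1 (([2, 1, 2, 3, 2, 4, 2, 5] : List Int).length : Int)) 0 then (1 : Int) else 0),
         s2 + (if p.2 = PySem.List.pyGetD [3, 3, 1, 1, 2, 2, 4, 4, 5, 5] (PySem.Int.mod p.1 (([3, 3, 1, 1, 2, 2, 4, 4, 5, 5] : List Int).length : Int)) 0 then (1 : Int) else 0)) := by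
      simp only [pvStepA]
      split_ifs <;> simp
    rw [hu, ih]
    simp only [pvMatch, List.filter_cons]
    split_ifs <;> simp_all [List.length_cons, Prod.mk.injEq] <;> omega

-- sum over distinct j of the indicator ((j, g j) = (p1, p2))
theorem pvSumInd (g : Int → Int) (p1 p2 : Int) :
    ∀ (R : List Int), R.Nodup →
      (R.map (fun j => if (j, g j) = (p1, p2) then (1 : Int) else 0)).sum =
        if p1 ∈ R ∧ p2 = g p1 then 1 else 0 := by
  intro R
  induction R with
  | nil => intro _; simp
  | cons r R ih =>
    intro hnd
    simp only [List.nodup_cons] at hnd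
    rw [List.map_cons, List.sum_cons, ih hnd.2]
    by_cases hr : r = p1
    · subst hr
      have hnmem : ¬ (r ∈ R ∧ p2 = g r) := fun hc => hnd.1 hc.1
      by_cases hgr : p2 = g r
      · have hhead : ((r, g r) = (r, p2)) := by rw [hgr]
        simp [hhead, hgr, hnd.1]
      · have hhead : ¬ ((r, g r) = (r, p2)) := by
          simp only [Prod.mk.injEq, true_and]
          exact fun h => hgr h.symm
        simp [hhead, hgr]
    · have hhead : ¬ ((r, g r) = (p1, p2)) := by
        simp only [Prod.mk.injEq, not_and]
        exact fun h => absurd h hr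
      have hr' : ¬ p1 = r := fun h => hr h.symm
      simp [hhead, hr']

-- counts a list of pairs against the graph of g over distinct first components
theorem pvSumCount (g : Int → Int) (R : List Int) (hR : R.Nodup) :
    ∀ (L : List (Int × Int)),
      (R.map (fun j => ((L.count (j, g j) : Int)))).sum =
        ((L.filter (fun p => decide (p.1 ∈ R) && decide (p.2 = g p.1))).length : Int) := by
  intro L
  induction L with
  | nil => simp
  | cons p L ih =>
    have hstep : ∀ j : Int, (((p :: L).count (j, g j) : Int)) =
        (L.count (j, g j) : Int) + (if (j, g j) = (p.1, p.2) then (1 : Int) else 0) := by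
      intro j
      rw [List.count_cons]
      split_ifs with h h' h' <;> simp_all
    simp only [hstep]
    rw [PySem.List.sum_map_add_int, ih, pvSumInd g p.1 p.2 R hR]
    simp only [List.filter_cons]
    by_cases hc : p.1 ∈ R ∧ p.2 = g p.1
    · simp only [hc.1, hc.2, decide_true, Bool.and_self, if_true, and_self, List.length_cons]
      push_cast; ring
    · have hb : (decide (p.1 ∈ R) && decide (p.2 = g p.1)) = false := by
        rcases not_and_or.mp hc with h | h <;> simp [h]
      simp [hc, hb]

-- i % 40 % n = i % n when n divides 40 (the three pattern lengths)
theorem pvModMod (i n : Int) (hn : 0 < n) (hdvd : n ∣ 40) :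
    PySem.Int.mod (PySem.Int.mod i 40) n = PySem.Int.mod i n := by
  rw [PySem.Int.mod_eq_emod_of_pos (show (0:Int) < 40 by norm_num),
      PySem.Int.mod_eq_emod_of_pos hn, PySem.Int.mod_eq_emod_of_pos hn]
  exact Int.emod_emod_of_dvd i hdvd

-- lookup in B's frequency table is a count over the key list
theorem pvCnt_getD (answers : List Int) (k : Int × Int) :
    (pvCnt answers).getD k 0 =
      (((PySem.List.enumerate answers 0).map (fun p => (PySem.Int.mod p.1 40, p.2))).count k : Int) := by
  unfold pvCnt
  have haux : ∀ (l : List (Int × Int)) (d : PySem.Dict (Int × Int) Int),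
      (l.foldl (fun d p => d.insert (PySem.Int.mod p.1 40, p.2) (d.getD (PySem.Int.mod p.1 40, p.2) 0 + 1)) d).getD k 0
        = d.getD k 0 + ((l.map (fun p => (PySem.Int.mod p.1 40, p.2))).count k : Int) := by
    intro l
    induction l with
    | nil => intro d; simp
    | cons p l ih =>
      intro d
      simp only [List.foldl_cons, List.map_cons, ih]
      rw [List.count_cons, PySem.Dict.getD_insert]
      split_ifs with h1 h2 h2 <;> simp_all <;> push_cast <;> ring
  rw [haux]
  simp [PySem.Dict.getD_empty]

-- B's per-pattern entry equals the match count
theorem pvEntry_eq (answers : List Int) (pat : List Int) (hn : 0 < (pat.length : Int))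
    (hdvd : (pat.length : Int) ∣ 40) :
    ((PySem.List.pyRange 0 40 1).map
      (fun j => (pvCnt answers).getD (j, PySem.List.pyGetD pat (PySem.Int.mod j (pat.length : Int)) 0) 0)).sum
    = pvMatch pat (PySem.List.enumerate answers 0) := by
  have hsum := pvSumCount (fun j => PySem.List.pyGetD pat (PySem.Int.mod j (pat.length : Int)) 0)
    (PySem.List.pyRange 0 40 1) (PySem.List.nodup_pyRange_one 0 40)
    ((PySem.List.enumerate answers 0).map (fun p => (PySem.Int.mod p.1 40, p.2)))
  simp only [pvCnt_getD]
  rw [hsum, List.filter_map, List.length_map]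
  unfold pvMatch
  congr 1
  simp only [Function.comp_def]
  refine congrArg List.length (List.filter_congr ?_)
  intro p _
  have hm40 : PySem.Int.mod p.1 40 = p.1 % 40 := PySem.Int.mod_eq_emod_of_pos (by norm_num)
  have h0 : (0:Int) ≤ p.1 % 40 := Int.emod_nonneg _ (by norm_num)
  have h1 : p.1 % 40 < 40 := Int.emod_lt_of_pos _ (by norm_num)
  have hgv : PySem.List.pyGetD pat (PySem.Int.mod (p.1 % 40) (pat.length : Int)) 0
      = PySem.List.pyGetD pat (PySem.Int.mod p.1 (pat.length : Int)) 0 := by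
    rw [← hm40, pvModMod p.1 _ hn hdvd]
  simp [PySem.List.mem_pyRange_one, h0, h1, hgv]

theorem solution_eq_alt (answers : List Int) : solution answers = solution_alt answers := by
  unfold solution solution_alt
  have h : (PySem.List.pyRange 0 (answers.length : Int) 1).foldl
      (fun s i => pvStepA s i (PySem.List.pyGetD answers i 0)) ((0 : Int), (0 : Int), (0 : Int)) =
      (PySem.List.enumerate answers 0).foldl (fun s p => pvStepA s p.1 p.2) (0, 0, 0) := by
    rw [PySem.List.enumerate_eq_map_pyRange answers 0, List.foldl_map]
    rfl
  rw [h, pvFoldA_eq]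
  simp only [List.map_cons, List.map_nil]
  rw [pvEntry_eq answers [1, 2, 3, 4, 5] (by norm_num) (by norm_num),
      pvEntry_eq answers [2, 1, 2, 3, 2, 4, 2, 5] (by norm_num) (by norm_num),
      pvEntry_eq answers [3, 3, 1, 1, 2, 2, 4, 4, 5, 5] (by norm_num) (by norm_num)]
  simp

-- ===== VERDICT (by name: the statement is the Claim_ definition above) =====
theorem solution_spec : Claim_equal_solution := by
  intro answers _
  exact solution_eq_alt answers
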